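-- pv_equiv track=rewrite | github.com/liqpayp/rephraser | backend/app/utils/pattern_analyzer.py | _find_keyboard_sequences
-- ===== SOURCE A (Python) =====
-- from typing import List, Dict, Set, Tuple
--
-- def _find_keyboard_sequences(password: str, min_length: int = 3) -> Set[str]:
--     """Поиск клавиатурных последовательностей"""
--     # Определяем раскладку клавиатуры
--     keyboard_layout = {
--         'row1': 'qwertyuiop',
--         'row2': 'asdfghjkl',
--         'row3': 'zxcvbnm',
--         'numbers': '1234567890'
--     }
--
--     sequences = set()
--     password = password.lower()
--
--     # Проверяем каждую строку клавиатуры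
--     for row in keyboard_layout.values():
--         for i in range(len(password) - min_length + 1):
--             substring = password[i:i + min_length]
--             # Проверяем прямое и обратное вхождение в строку клавиатуры
--             if substring in row or substring in row[::-1]:
--                 sequences.add(substring)
--
--     return sequences
-- ===== SOURCE B (Python) =====
-- def _find_keyboard_sequences(password: str, min_length: int = 3):
--     """Locate each character on the keyboard once, then classify every window by
--     index arithmetic (consecutive positions within one row, read forward or
--     backward), grouping the findings by keyboard row."""
--     rows = ('qwertyuiop', 'asdfghjkl', 'zxcvbnm', '1234567890')
--     m = min_length
--
--     def loc(c):
--         for r, row in enumerate(rows):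
--             k = row.find(c)
--             if k >= 0:
--                 return (r, k)
--         return None
--
--     def seq_row(w):
--         locs = [loc(c) for c in w]
--         head = locs[0]
--         if head is None:
--             return None
--         r, k0 = head
--         if locs == [(r, k0 + d) for d in range(m)] or locs == [(r, k0 - d) for d in range(m)]:
--             return r
--         return None
--
--     if m < 1:
--         return set()
--     pwd = password.lower()
--     buckets = [[], [], [], []]
--     for i in range(len(pwd) - m + 1):
--         w = pwd[i:i + m]
--         r = seq_row(w)
--         if r is not None:
--             buckets[r].append(w)
--     return set(w for b in buckets for w in b)
-- ===== Notes on version B (the rewrite author's own statement) =====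
-- stated objective: alternative
-- what changed: B inverts the test: instead of A's per-row rescans asking whether each window is a substring of the row or its reversal, B locates every character's keyboard position (row, index) via a lookup helper and classifies each window once by index arithmetic (consecutive positions in one row, ascending or descending), collecting results into per-row buckets.
-- intended difference: For min_length <= 0 A returns a set of accidental negative-stop wraparound slices of the password (always containing the empty string), while B returns the empty set, the intended value since there are no keyboard sequences of non-positive length. — e.g. on _find_keyboard_sequences("qw", 0): A returns [""], B returns []
import Mathlib
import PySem

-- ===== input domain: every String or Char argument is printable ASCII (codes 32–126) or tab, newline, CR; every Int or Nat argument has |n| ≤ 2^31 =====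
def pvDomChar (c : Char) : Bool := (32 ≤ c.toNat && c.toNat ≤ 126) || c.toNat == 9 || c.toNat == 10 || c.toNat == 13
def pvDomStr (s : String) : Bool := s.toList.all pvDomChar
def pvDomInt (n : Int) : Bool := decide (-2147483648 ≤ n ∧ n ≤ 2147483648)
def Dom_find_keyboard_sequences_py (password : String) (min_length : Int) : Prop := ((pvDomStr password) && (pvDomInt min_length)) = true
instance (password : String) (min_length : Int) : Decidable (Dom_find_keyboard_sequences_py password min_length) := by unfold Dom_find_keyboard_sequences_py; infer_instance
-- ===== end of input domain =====

-- B locates each character's keyboard position once and classifies every window by index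
-- arithmetic (consecutive positions in one row, forward or backward), grouping results by row,
-- instead of A's per-row substring-containment rescans (objective: alternative); for
-- min_length ≤ 0 B returns the empty set where A returns wraparound slices (see D_ below).

-- ===== PORT A =====
def pvRowsA : List String := ["qwertyuiop", "asdfghjkl", "zxcvbnm", "1234567890"]

def find_keyboard_sequences_py (password : String) (min_length : Int) : List String :=
  let pwd := PySem.Str.lower password
  pvRowsA.foldl (fun seqs row =>
    (PySem.List.pyRange 0 (PySem.Str.len pwd - min_length + 1) 1).foldl (fun seqs i =>
      let substring := PySem.Str.slice pwd (some i) (some (i + min_length))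
      if PySem.Str.isIn substring row
          || PySem.Str.isIn substring ((PySem.Str.slice? row none none (-1)).getD row) then
        PySem.Set.add seqs substring
      else seqs) seqs) []

-- ===== PORT B =====
def pvRowsB : List String := ["qwertyuiop", "asdfghjkl", "zxcvbnm", "1234567890"]

def pvLocAux (c : Char) : List (Int × String) → Option (Int × Int)
  | [] => none
  | (r, row) :: rest =>
      if 0 ≤ PySem.Chars.find row.toList [c] then some (r, PySem.Chars.find row.toList [c])
      else pvLocAux c rest

def pvLoc (c : Char) : Option (Int × Int) := pvLocAux c (PySem.List.enumerate pvRowsB)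

def pvSeqRow (m : Int) (w : String) : Option Int :=
  match PySem.List.pyGet? (w.toList.map pvLoc) 0 with
  | some (some (r, k0)) =>
      if w.toList.map pvLoc = (PySem.List.pyRange 0 m 1).map (fun d => some (r, k0 + d))
          ∨ w.toList.map pvLoc = (PySem.List.pyRange 0 m 1).map (fun d => some (r, k0 - d)) then some r
      else none
  | _ => none

def pvAppendAt : List (List String) → Int → String → List (List String)
  | [], _, _ => []
  | b :: bs, r, w => if r = 0 then (b ++ [w]) :: bs else b :: pvAppendAt bs (r - 1) w

def find_keyboard_sequences_py_alt (password : String) (min_length : Int) : List String :=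
  if min_length < 1 then [] else
    let pwd := PySem.Str.lower password
    let buckets :=
      (PySem.List.pyRange 0 (PySem.Str.len pwd - min_length + 1) 1).foldl
        (fun bs i =>
          let w := PySem.Str.slice pwd (some i) (some (i + min_length))
          match pvSeqRow min_length w with
          | some r => pvAppendAt bs r w
          | none => bs)
        [[], [], [], []]
    PySem.Set.ofList (buckets.flatMap id)

-- ===== PRECONDITION & SPEC =====
-- For min_length ≤ 0 A returns a set of accidental negative-stop wraparound slices (always
-- containing the empty string), while B returns the empty set — the intended value, since there are no
-- keyboard sequences of non-positive length.
def D_find_keyboard_sequences_py (password : String) (min_length : Int) : Prop := min_length ≤ 0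
instance (password : String) (min_length : Int) : Decidable (D_find_keyboard_sequences_py password min_length) := by unfold D_find_keyboard_sequences_py; infer_instance

def Spec_find_keyboard_sequences_py (password : String) (min_length : Int) (out : List String) : Prop := ¬ D_find_keyboard_sequences_py password min_length → out = find_keyboard_sequences_py_alt password min_length
instance (password : String) (min_length : Int) (out : List String) : Decidable (Spec_find_keyboard_sequences_py password min_length out) := by unfold Spec_find_keyboard_sequences_py; infer_instance

def pvDiffWitness_find_keyboard_sequences_py : String × Int := ("qw", 0)
def pvDiffWitnessOut_find_keyboard_sequences_py : (List String) × (List String) := ([""], [])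

-- ===== CLAIM (what is proved, stated in full; the proofs are below) =====
def Claim_unchanged_find_keyboard_sequences_py : Prop := ∀ (password : String) (min_length : Int), Dom_find_keyboard_sequences_py password min_length → Spec_find_keyboard_sequences_py password min_length (find_keyboard_sequences_py password min_length)
def Claim_changed_find_keyboard_sequences_py : Prop := Dom_find_keyboard_sequences_py (pvDiffWitness_find_keyboard_sequences_py.1) (pvDiffWitness_find_keyboard_sequences_py.2) ∧ D_find_keyboard_sequences_py (pvDiffWitness_find_keyboard_sequences_py.1) (pvDiffWitness_find_keyboard_sequences_py.2) ∧ find_keyboard_sequences_py (pvDiffWitness_find_keyboard_sequences_py.1) (pvDiffWitness_find_keyboard_sequences_py.2) = pvDiffWitnessOut_find_keyboard_sequences_py.1 ∧ find_keyboard_sequences_py_alt (pvDiffWitness_find_keyboard_sequences_py.1) (pvDiffWitness_find_keyboard_sequences_py.2) = pvDiffWitnessOut_find_keyboard_sequences_py.2 ∧ pvDiffWitnessOut_find_keyboard_sequences_py.1 ≠ pvDiffWitnessOut_find_keyboard_sequences_py.2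
def Claim_exact_find_keyboard_sequences_py : Prop := ∀ (password : String) (min_length : Int), Dom_find_keyboard_sequences_py password min_length → D_find_keyboard_sequences_py password min_length → find_keyboard_sequences_py password min_length ≠ find_keyboard_sequences_py_alt password min_length

-- ===== LEMMAS AND PROOFS =====

theorem pvDisj (A B : List Char) (hall : A.all (fun c => ! B.contains c) = true) :
    ∀ x ∈ A, x ∉ B := by
  intro x hx
  have := List.all_eq_true.mp hall x hx
  simpa using this

theorem pvSingletonInfix (c : Char) (L : List Char) : [c] <:+: L ↔ c ∈ L := by
  constructor
  · rintro ⟨s1, s2, h⟩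
    rw [← h]; simp
  · intro h
    obtain ⟨s, t, rfl⟩ := List.append_of_mem h
    exact ⟨s, t, by simp⟩

theorem pvFindCharMem (L : List Char) (c : Char) (k : Int)
    (hk : PySem.Chars.find L [c] = k) (h0 : 0 ≤ k) :
    ∃ h : k.toNat < L.length, L[k.toNat] = c := by
  obtain ⟨hpre, -⟩ := PySem.Chars.find_spec (hk ▸ h0 : 0 ≤ PySem.Chars.find L [c])
  rw [hk] at hpre
  obtain ⟨t, ht⟩ := hpre
  have hget : L[k.toNat]? = some c := by
    have : (List.drop k.toNat L)[0]? = L[k.toNat + 0]? := List.getElem?_drop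
    rw [← ht] at this
    simpa using this.symm
  exact ⟨(List.getElem?_eq_some_iff.mp hget).1, (List.getElem?_eq_some_iff.mp hget).2⟩

theorem pvFindCharEq (L : List Char) (hnd : L.Nodup) (c : Char) (n : Nat)
    (hn : n < L.length) (hc : L[n] = c) : PySem.Chars.find L [c] = (n : Int) := by
  have hmem : c ∈ L := hc ▸ List.getElem_mem hn
  have h0 : 0 ≤ PySem.Chars.find L [c] :=
    (PySem.Chars.find_nonneg_iff L [c]).mpr ((pvSingletonInfix c L).mpr hmem)
  obtain ⟨hlt, hg⟩ := pvFindCharMem L c _ rfl h0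
  have : (PySem.Chars.find L [c]).toNat = n := by
    exact (List.Nodup.getElem_inj_iff hnd (hi := hlt) (hj := hn)).mp (by rw [hg, hc])
  omega

theorem pvNotFind (L : List Char) (c : Char) (hc : c ∉ L) :
    ¬ 0 ≤ PySem.Chars.find L [c] := by
  intro h
  exact hc ((pvSingletonInfix c L).mp ((PySem.Chars.find_nonneg_iff L [c]).mp h))

theorem pvFindBranch (L : List Char) (c : Char) (k : Int)
    (h1 : 0 ≤ PySem.Chars.find L [c]) (he : PySem.Chars.find L [c] = k) :
    0 ≤ k ∧ ∃ h : k.toNat < L.length, L[k.toNat] = c :=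
  ⟨he ▸ h1, pvFindCharMem L c k he (he ▸ h1)⟩

theorem pvEnum : PySem.List.enumerate pvRowsB
    = [(0, "qwertyuiop"), (1, "asdfghjkl"), (2, "zxcvbnm"), (3, "1234567890")] := by
  simp [pvRowsB, PySem.List.enumerate_cons, PySem.List.enumerate_nil]

theorem pvLocRow (c : Char) (r k : Int) (h : pvLoc c = some (r, k)) :
    r = 0 ∨ r = 1 ∨ r = 2 ∨ r = 3 := by
  rw [pvLoc, pvEnum] at h
  simp only [pvLocAux] at h
  split_ifs at h <;> simp_all

set_option maxRecDepth 8192 in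
theorem pvLocChar0 (c : Char) (k : Int) :
    pvLoc c = some (0, k)
      ↔ 0 ≤ k ∧ ∃ h : k.toNat < ("qwertyuiop".toList).length, ("qwertyuiop".toList)[k.toNat] = c := by
  rw [pvLoc, pvEnum]
  simp only [pvLocAux]
  constructor
  · intro h
    split_ifs at h with h1 h2 h3 h4
    · exact pvFindBranch _ c k h1 (congrArg Prod.snd (Option.some.inj h))
    · exact absurd (congrArg Prod.fst (Option.some.inj h)) (by norm_num)
    · exact absurd (congrArg Prod.fst (Option.some.inj h)) (by norm_num)
    · exact absurd (congrArg Prod.fst (Option.some.inj h)) (by norm_num)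
  · rintro ⟨h0, hlt, hc⟩
    have hmem : c ∈ "qwertyuiop".toList := hc ▸ List.getElem_mem hlt
    have hf : PySem.Chars.find "qwertyuiop".toList [c] = k := by
      have := pvFindCharEq _ (by decide) c k.toNat hlt hc
      simpa [Int.toNat_of_nonneg h0] using this
    rw [if_pos (hf ▸ h0), hf]

set_option maxRecDepth 8192 in
theorem pvLocChar1 (c : Char) (k : Int) :
    pvLoc c = some (1, k)
      ↔ 0 ≤ k ∧ ∃ h : k.toNat < ("asdfghjkl".toList).length, ("asdfghjkl".toList)[k.toNat] = c := by
  rw [pvLoc, pvEnum]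
  simp only [pvLocAux]
  constructor
  · intro h
    split_ifs at h with h1 h2 h3 h4
    · exact absurd (congrArg Prod.fst (Option.some.inj h)) (by norm_num)
    · exact pvFindBranch _ c k h2 (congrArg Prod.snd (Option.some.inj h))
    · exact absurd (congrArg Prod.fst (Option.some.inj h)) (by norm_num)
    · exact absurd (congrArg Prod.fst (Option.some.inj h)) (by norm_num)
  · rintro ⟨h0, hlt, hc⟩
    have hmem : c ∈ "asdfghjkl".toList := hc ▸ List.getElem_mem hlt
    have hn0 : c ∉ "qwertyuiop".toList := fun hx => pvDisj _ _ (by decide) c hmem hx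
    have hf : PySem.Chars.find "asdfghjkl".toList [c] = k := by
      have := pvFindCharEq _ (by decide) c k.toNat hlt hc
      simpa [Int.toNat_of_nonneg h0] using this
    rw [if_neg (pvNotFind _ c hn0), if_pos (hf ▸ h0), hf]

set_option maxRecDepth 8192 in
theorem pvLocChar2 (c : Char) (k : Int) :
    pvLoc c = some (2, k)
      ↔ 0 ≤ k ∧ ∃ h : k.toNat < ("zxcvbnm".toList).length, ("zxcvbnm".toList)[k.toNat] = c := by
  rw [pvLoc, pvEnum]
  simp only [pvLocAux]
  constructor
  · intro h
    split_ifs at h with h1 h2 h3 h4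
    · exact absurd (congrArg Prod.fst (Option.some.inj h)) (by norm_num)
    · exact absurd (congrArg Prod.fst (Option.some.inj h)) (by norm_num)
    · exact pvFindBranch _ c k h3 (congrArg Prod.snd (Option.some.inj h))
    · exact absurd (congrArg Prod.fst (Option.some.inj h)) (by norm_num)
  · rintro ⟨h0, hlt, hc⟩
    have hmem : c ∈ "zxcvbnm".toList := hc ▸ List.getElem_mem hlt
    have hn0 : c ∉ "qwertyuiop".toList := fun hx => pvDisj _ _ (by decide) c hmem hx
    have hn1 : c ∉ "asdfghjkl".toList := fun hx => pvDisj _ _ (by decide) c hmem hx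
    have hf : PySem.Chars.find "zxcvbnm".toList [c] = k := by
      have := pvFindCharEq _ (by decide) c k.toNat hlt hc
      simpa [Int.toNat_of_nonneg h0] using this
    rw [if_neg (pvNotFind _ c hn0), if_neg (pvNotFind _ c hn1), if_pos (hf ▸ h0), hf]

set_option maxRecDepth 8192 in
theorem pvLocChar3 (c : Char) (k : Int) :
    pvLoc c = some (3, k)
      ↔ 0 ≤ k ∧ ∃ h : k.toNat < ("1234567890".toList).length, ("1234567890".toList)[k.toNat] = c := by
  rw [pvLoc, pvEnum]
  simp only [pvLocAux]
  constructor
  · intro h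
    split_ifs at h with h1 h2 h3 h4
    · exact absurd (congrArg Prod.fst (Option.some.inj h)) (by norm_num)
    · exact absurd (congrArg Prod.fst (Option.some.inj h)) (by norm_num)
    · exact absurd (congrArg Prod.fst (Option.some.inj h)) (by norm_num)
    · exact pvFindBranch _ c k h4 (congrArg Prod.snd (Option.some.inj h))
  · rintro ⟨h0, hlt, hc⟩
    have hmem : c ∈ "1234567890".toList := hc ▸ List.getElem_mem hlt
    have hn0 : c ∉ "qwertyuiop".toList := fun hx => pvDisj _ _ (by decide) c hmem hx
    have hn1 : c ∉ "asdfghjkl".toList := fun hx => pvDisj _ _ (by decide) c hmem hx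
    have hn2 : c ∉ "zxcvbnm".toList := fun hx => pvDisj _ _ (by decide) c hmem hx
    have hf : PySem.Chars.find "1234567890".toList [c] = k := by
      have := pvFindCharEq _ (by decide) c k.toNat hlt hc
      simpa [Int.toNat_of_nonneg h0] using this
    rw [if_neg (pvNotFind _ c hn0), if_neg (pvNotFind _ c hn1), if_neg (pvNotFind _ c hn2), if_pos (hf ▸ h0), hf]

theorem pvInfixTD (t l : List Char) :
    t <:+: l ↔ ∃ n : Nat, n + t.length ≤ l.length ∧ t = (l.drop n).take t.length := by
  constructor
  · rintro ⟨s₁, s₂, h⟩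
    refine ⟨s₁.length, ?_, ?_⟩
    · rw [← h]; simp [List.length_append]
    · rw [← h, List.append_assoc, List.drop_left, List.take_left]
  · rintro ⟨n, hn, ht⟩
    refine ⟨l.take n, l.drop (n + t.length), ?_⟩
    conv_rhs => rw [← List.take_append_drop n l, ← List.take_append_drop t.length (l.drop n)]
    rw [List.drop_drop, ← ht, List.append_assoc]

theorem pvInfixPointwise (t l : List Char) (ht : t ≠ []) :
    t <:+: l ↔ ∃ n : Nat, ∀ d (hd : d < t.length), ∃ h : n + d < l.length, l[n + d] = t[d] := by
  rw [pvInfixTD]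
  constructor
  · rintro ⟨n, hn, he⟩
    refine ⟨n, fun d hd => ?_⟩
    refine ⟨by omega, ?_⟩
    rw [List.getElem_of_eq he hd, List.getElem_take, List.getElem_drop]
  · rintro ⟨n, hp⟩
    have hlen : n + t.length ≤ l.length := by
      have h0 : 0 < t.length := List.length_pos_iff.mpr ht
      obtain ⟨h, _⟩ := hp (t.length - 1) (by omega)
      omega
    refine ⟨n, hlen, ?_⟩
    apply List.ext_getElem
    · simp; omega
    · intro d hd1 hd2
      obtain ⟨h, he⟩ := hp d hd1
      rw [List.getElem_take, List.getElem_drop, he]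

theorem pvSeqRow_some (m : Int) (w : String) (r k0 : Int)
    (hh : PySem.List.pyGet? (w.toList.map pvLoc) 0 = some (some (r, k0))) :
    pvSeqRow m w
      = if w.toList.map pvLoc = (PySem.List.pyRange 0 m 1).map (fun d => some (r, k0 + d))
            ∨ w.toList.map pvLoc = (PySem.List.pyRange 0 m 1).map (fun d => some (r, k0 - d))
        then some r else none := by
  unfold pvSeqRow
  rw [hh]

theorem pvSeqRow_noneHead (m : Int) (w : String)
    (hh : PySem.List.pyGet? (w.toList.map pvLoc) 0 = some none) :
    pvSeqRow m w = none := by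
  unfold pvSeqRow
  rw [hh]

-- locs-list equality, pointwise

theorem pvMapEq (t : List Char) (m : Int) (hm : 1 ≤ m) (hmN : t.length = m.toNat)
    (f : Int → Option (Int × Int)) :
    (t.map pvLoc = (PySem.List.pyRange 0 m 1).map f)
      ↔ ∀ d (hd : d < t.length), pvLoc t[d] = f (d : Int) := by
  have hr : PySem.List.pyRange 0 m 1 = List.map (fun k : Nat => (k : Int)) (List.range m.toNat) := by
    have := PySem.List.pyRange_zero_natCast m.toNat
    rwa [Int.toNat_of_nonneg (by omega : (0:Int) ≤ m)] at this
  rw [hr, List.map_map]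
  constructor
  · intro he d hd
    have := List.getElem_of_eq he (show d < (t.map pvLoc).length by simpa using hd)
    simpa using this
  · intro hp
    apply List.ext_getElem
    · simp [hmN]
    · intro d hd1 hd2
      simp only [List.getElem_map, List.getElem_range, Function.comp_apply]
      exact hp d (by simpa using hd1)

-- head of locs

theorem pvLocsHead (t : List Char) (h0 : 0 < t.length) :
    PySem.List.pyGet? (t.map pvLoc) 0 = some (pvLoc (t[0]'h0)) := by
  have : PySem.List.pyGet? (t.map pvLoc) ((0 : Nat) : Int) = (t.map pvLoc)[0]? :=
    PySem.List.pyGet?_natCast _ 0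
  rw [show ((0:Nat):Int) = 0 from rfl] at this
  rw [this]
  rw [List.getElem?_eq_getElem (by simpa using h0)]
  simp

theorem pvCore (L : List Char) (j m : Int) (w : String)
    (hm : 1 ≤ m) (hw : ((w.toList.length : Int)) = m)
    (HLoc : ∀ c k, pvLoc c = some (j, k)
        ↔ 0 ≤ k ∧ ∃ h : k.toNat < L.length, L[k.toNat] = c) :
    (w.toList <:+: L ∨ w.toList <:+: L.reverse) ↔ pvSeqRow m w = some j := by
  have hmN : w.toList.length = m.toNat := by omega
  have h0 : 0 < w.toList.length := by omega
  have htne : w.toList ≠ [] := List.length_pos_iff.mp h0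
  constructor
  · rintro (hinf | hinf)
    · rw [pvInfixPointwise _ _ htne] at hinf
      obtain ⟨n, hp⟩ := hinf
      have hloc : ∀ d (hd : d < w.toList.length),
          pvLoc (w.toList[d]) = some (j, (n : Int) + (d : Int)) := by
        intro d hd
        obtain ⟨hb, he⟩ := hp d hd
        refine (HLoc _ _).mpr ⟨by omega, ?_⟩
        have hcast : ((n : Int) + (d : Int)).toNat = n + d := by omega
        simp only [hcast]
        exact ⟨hb, he⟩
      rw [pvSeqRow_some m w j ((n : Int) + ((0:Nat) : Int)) (by rw [pvLocsHead _ h0, hloc 0 h0])]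
      rw [if_pos]
      left
      refine (pvMapEq _ m hm hmN _).mpr ?_
      intro d hd
      rw [hloc d hd]
      norm_num
    · rw [pvInfixPointwise _ _ htne] at hinf
      obtain ⟨n, hp⟩ := hinf
      have hloc : ∀ d (hd : d < w.toList.length),
          pvLoc (w.toList[d]) = some (j, ((L.length - 1 - n : Nat) : Int) - (d : Int)) := by
        intro d hd
        obtain ⟨hb, he⟩ := hp d hd
        rw [List.length_reverse] at hb
        rw [List.getElem_reverse] at he
        refine (HLoc _ _).mpr ⟨by omega, ?_⟩
        have hcast : (((L.length - 1 - n : Nat) : Int) - (d : Int)).toNat = L.length - 1 - (n + d) := by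
          omega
        simp only [hcast]
        exact ⟨by omega, he⟩
      rw [pvSeqRow_some m w j (((L.length - 1 - n : Nat) : Int) - ((0:Nat) : Int)) (by rw [pvLocsHead _ h0, hloc 0 h0])]
      rw [if_pos]
      right
      refine (pvMapEq _ m hm hmN _).mpr ?_
      intro d hd
      rw [hloc d hd]
      norm_num
  · intro h
    rcases hv : pvLoc (w.toList[0]'h0) with _ | ⟨r0, k0⟩
    · rw [pvSeqRow_noneHead m w (by rw [pvLocsHead _ h0, hv])] at h
      simp at h
    · rw [pvSeqRow_some m w r0 k0 (by rw [pvLocsHead _ h0, hv])] at h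
      split_ifs at h with hcond
      · have hrj : r0 = j := by simpa using h
        subst hrj
        rcases hcond with hasc | hdesc
        · left
          rw [pvInfixPointwise _ _ htne]
          have hall := (pvMapEq _ m hm hmN _).mp hasc
          have hk0 : 0 ≤ k0 := by
            have := (HLoc _ _).mp (by simpa using hall 0 h0)
            omega
          refine ⟨k0.toNat, fun d hd => ?_⟩
          obtain ⟨hge, hlt, he⟩ := (HLoc _ _).mp (hall d hd)
          have hcast : (k0 + (d : Int)).toNat = k0.toNat + d := by omega
          simp only [hcast] at hlt he
          exact ⟨hlt, he⟩
        · right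
          rw [pvInfixPointwise _ _ htne]
          have hall := (pvMapEq _ m hm hmN _).mp hdesc
          have hk0 : 0 ≤ k0 ∧ k0.toNat < L.length := by
            have := (HLoc _ _).mp (by simpa using hall 0 h0)
            obtain ⟨hge, hlt, -⟩ := this
            constructor
            · omega
            · have : (k0 - ((0:Nat) : Int)).toNat = k0.toNat := by omega
              omega
          refine ⟨L.length - 1 - k0.toNat, fun d hd => ?_⟩
          obtain ⟨hge, hlt, he⟩ := (HLoc _ _).mp (hall d hd)
          have hdk : d ≤ k0.toNat := by omega
          have hb : L.length - 1 - k0.toNat + d < L.reverse.length := by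
            rw [List.length_reverse]; omega
          refine ⟨hb, ?_⟩
          rw [List.getElem_reverse]
          have hcast : (k0 - (d : Int)).toNat = L.length - 1 - (L.length - 1 - k0.toNat + d) := by
            omega
          simp only [hcast] at he
          exact he

theorem pvFoldAddIf (c : Int → Bool) (f : Int → String) (l : List Int) (s : PySem.Set String) :
    l.foldl (fun s i => if c i then PySem.Set.add s (f i) else s) s
      = ((l.filter c).map f).foldl PySem.Set.add s := by
  induction l generalizing s with
  | nil => rfl
  | cons a l ih =>
      by_cases h : c a = true
      · simp [List.foldl, h, ih]
      · simp [List.foldl, List.filter, h, ih]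

theorem pvWindowLen (pwd : String) (m i : Int) (hm : 1 ≤ m) (h0 : 0 ≤ i)
    (hlt : i < PySem.Str.len pwd - m + 1) :
    (((PySem.Str.slice pwd (some i) (some (i + m))).toList.length : Int)) = m := by
  rw [PySem.Str.toList_slice, PySem.Chars.slice_eq_listSlice,
    PySem.List.slice_toNat _ h0 (by omega)]
  simp only [PySem.Str.len_eq] at hlt
  simp only [List.length_take, List.length_drop]
  omega

theorem pvSeqRowRow (m : Int) (w : String) (r : Int) (h : pvSeqRow m w = some r) :
    r = 0 ∨ r = 1 ∨ r = 2 ∨ r = 3 := by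
  rcases Nat.eq_zero_or_pos w.toList.length with hz | h0
  · unfold pvSeqRow at h
    rw [List.length_eq_zero_iff.mp hz] at h
    rw [show PySem.List.pyGet? (List.map pvLoc ([] : List Char)) 0 = none from by
      simpa using PySem.List.pyGet?_natCast (List.map pvLoc ([] : List Char)) 0] at h
    simp at h
  · rcases hv : pvLoc (w.toList[0]'h0) with _ | ⟨r0, k0⟩
    · rw [pvSeqRow_noneHead m w (by rw [pvLocsHead _ h0, hv])] at h
      simp at h
    · rw [pvSeqRow_some m w r0 k0 (by rw [pvLocsHead _ h0, hv])] at h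
      split_ifs at h
      have hr : r0 = r := by simpa using h
      subst hr
      exact pvLocRow _ _ _ hv

theorem pvBuckets (m : Int) (ws : List String) (b0 b1 b2 b3 : List String) :
    ws.foldl (fun bs w => match pvSeqRow m w with
        | some r => pvAppendAt bs r w
        | none => bs) [b0, b1, b2, b3]
      = [b0 ++ ws.filter (fun w => pvSeqRow m w == some 0),
         b1 ++ ws.filter (fun w => pvSeqRow m w == some 1),
         b2 ++ ws.filter (fun w => pvSeqRow m w == some 2),
         b3 ++ ws.filter (fun w => pvSeqRow m w == some 3)] := by
  induction ws generalizing b0 b1 b2 b3 with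
  | nil => simp
  | cons w ws ih =>
      rcases hs : pvSeqRow m w with _ | r
      · simp [List.foldl_cons, hs, ih]
      · rcases pvSeqRowRow m w r hs with rfl | rfl | rfl | rfl
        · simp only [List.foldl_cons, hs]
          rw [show pvAppendAt [b0, b1, b2, b3] 0 w = [b0 ++ [w], b1, b2, b3] from by
            simp [pvAppendAt]]
          rw [ih]
          simp only [List.filter_cons, hs]
          simp
        · simp only [List.foldl_cons, hs]
          rw [show pvAppendAt [b0, b1, b2, b3] 1 w = [b0, b1 ++ [w], b2, b3] from by
            simp [pvAppendAt]]
          rw [ih]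
          simp only [List.filter_cons, hs]
          simp
        · simp only [List.foldl_cons, hs]
          rw [show pvAppendAt [b0, b1, b2, b3] 2 w = [b0, b1, b2 ++ [w], b3] from by
            simp [pvAppendAt]]
          rw [ih]
          simp only [List.filter_cons, hs]
          simp
        · simp only [List.foldl_cons, hs]
          rw [show pvAppendAt [b0, b1, b2, b3] 3 w = [b0, b1, b2, b3 ++ [w]] from by
            simp [pvAppendAt]]
          rw [ih]
          simp only [List.filter_cons, hs]
          simp

theorem pvFoldSlice (l : List Int) (pwd : String) (m : Int) (bs₀ : List (List String)) :
    l.foldl (fun bs i =>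
        let w := PySem.Str.slice pwd (some i) (some (i + m))
        match pvSeqRow m w with
        | some r => pvAppendAt bs r w
        | none => bs) bs₀
    = (l.map (fun i => PySem.Str.slice pwd (some i) (some (i + m)))).foldl
        (fun bs w => match pvSeqRow m w with | some r => pvAppendAt bs r w | none => bs) bs₀ := by
  induction l generalizing bs₀ with
  | nil => rfl
  | cons a l ih =>
      simp only [List.foldl_cons, List.map_cons]
      rw [ih]

theorem pvRowEq (pwd : String) (m : Int) (hm : 1 ≤ m) (row : String) (j : Int)
    (HLoc : ∀ c k, pvLoc c = some (j, k)
        ↔ 0 ≤ k ∧ ∃ h : k.toNat < row.toList.length, row.toList[k.toNat] = c) :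
    ((PySem.List.pyRange 0 (PySem.Str.len pwd - m + 1) 1).filter
        (fun i => PySem.Str.isIn (PySem.Str.slice pwd (some i) (some (i + m))) row
          || PySem.Str.isIn (PySem.Str.slice pwd (some i) (some (i + m)))
              ((PySem.Str.slice? row none none (-1)).getD row))).map
      (fun i => PySem.Str.slice pwd (some i) (some (i + m)))
    = ((PySem.List.pyRange 0 (PySem.Str.len pwd - m + 1) 1).map
        (fun i => PySem.Str.slice pwd (some i) (some (i + m)))).filter
      (fun w => pvSeqRow m w == some j) := by
  rw [List.filter_map]
  congr 1
  apply List.filter_congr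
  intro i hi
  rw [PySem.List.mem_pyRange_one] at hi
  have hlen := pvWindowLen pwd m i hm hi.1 hi.2
  simp only [Function.comp_apply]
  rw [Bool.eq_iff_iff, Bool.or_eq_true, beq_iff_eq]
  rw [PySem.Str.isIn_iff_infix, PySem.Str.isIn_iff_infix]
  have hrev : ((PySem.Str.slice? row none none (-1)).getD row).toList = row.toList.reverse := by
    rw [PySem.Str.slice?_none_none_neg_one]
    simp
  rw [hrev]
  exact pvCore row.toList j m _ hm hlen HLoc

theorem pvMainEq (password : String) (m : Int) (hm : 1 ≤ m) :
    find_keyboard_sequences_py password m = find_keyboard_sequences_py_alt password m := by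
  unfold find_keyboard_sequences_py find_keyboard_sequences_py_alt pvRowsA
  rw [if_neg (by omega)]
  simp only [List.foldl_cons, List.foldl_nil, pvFoldAddIf]
  rw [pvFoldSlice, pvBuckets]
  simp only [List.nil_append, List.flatMap_cons, List.flatMap_nil, id, List.append_nil]
  rw [PySem.Set.ofList_eq_foldl]
  simp only [List.foldl_append]
  rw [pvRowEq _ m hm "qwertyuiop" 0 pvLocChar0,
    pvRowEq _ m hm "asdfghjkl" 1 pvLocChar1,
    pvRowEq _ m hm "zxcvbnm" 2 pvLocChar2,
    pvRowEq _ m hm "1234567890" 3 pvLocChar3]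

-- membership in a fold of Set.add is preserved and gained (for the tight theorem)
theorem pvMemFoldAdd_of_mem_set (l : List String) (s : PySem.Set String) (x : String)
    (h : x ∈ s) : x ∈ l.foldl PySem.Set.add s := by
  induction l generalizing s with
  | nil => exact h
  | cons a l ih => exact ih _ ((PySem.Set.mem_add s a x).mpr (Or.inl h))

theorem pvMemFoldAdd_of_mem_list (l : List String) (s : PySem.Set String) (x : String)
    (h : x ∈ l) : x ∈ l.foldl PySem.Set.add s := by
  induction l generalizing s with
  | nil => cases h
  | cons a l ih =>
      rcases List.mem_cons.mp h with rfl | h'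
      · exact pvMemFoldAdd_of_mem_set l _ x ((PySem.Set.mem_add s x x).mpr (Or.inr rfl))
      · exact ih _ h'

-- the empty window: the last scanning index slices to "" when min_length ≤ 0
theorem pvSliceEmpty (pwd : String) (m : Int) (hm : m ≤ 0) :
    PySem.Str.slice pwd (some (PySem.Str.len pwd - m)) (some (PySem.Str.len pwd - m + m)) = "" := by
  apply String.toList_inj.mp
  rw [PySem.Str.toList_slice, PySem.Chars.slice_eq_listSlice]
  have h0 : (0:Int) ≤ PySem.Str.len pwd := by rw [PySem.Str.len_eq]; positivity
  rw [PySem.List.slice_toNat _ (by omega) (by omega)]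
  rw [PySem.Str.len_eq] at h0 ⊢
  have : (PySem.Str.len pwd - m + m).toNat - (PySem.Str.len pwd - m).toNat = 0 := by
    rw [PySem.Str.len_eq]; omega
  rw [PySem.Str.len_eq] at this
  rw [this]
  simp

-- isIn of the empty string is always true
theorem pvIsInEmpty (v : String) : PySem.Str.isIn "" v = true := by
  rw [PySem.Str.isIn_iff_infix]; simp

-- ===== VERDICT (by name: the statement is the Claim_ definition above) =====
theorem find_keyboard_sequences_py_spec : Claim_unchanged_find_keyboard_sequences_py := by
  intro password m hDom hD
  have hm : 1 ≤ m := by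
    unfold D_find_keyboard_sequences_py at hD; omega
  exact pvMainEq password m hm

theorem find_keyboard_sequences_py_changed : Claim_changed_find_keyboard_sequences_py := by
  unfold Claim_changed_find_keyboard_sequences_py; decide

theorem find_keyboard_sequences_py_tight : Claim_exact_find_keyboard_sequences_py := by
  intro password m hDom hD hEq
  unfold D_find_keyboard_sequences_py at hD
  have hB : find_keyboard_sequences_py_alt password m = [] := by
    unfold find_keyboard_sequences_py_alt
    rw [if_pos (by omega)]
  rw [hB] at hEq
  have hmem : "" ∈ find_keyboard_sequences_py password m := by
    unfold find_keyboard_sequences_py pvRowsA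
    simp only [List.foldl_cons, List.foldl_nil, pvFoldAddIf]
    apply pvMemFoldAdd_of_mem_set
    apply pvMemFoldAdd_of_mem_set
    apply pvMemFoldAdd_of_mem_set
    apply pvMemFoldAdd_of_mem_list
    rw [List.mem_map]
    refine ⟨PySem.Str.len (PySem.Str.lower password) - m, ?_, pvSliceEmpty _ m hD⟩
    rw [List.mem_filter]
    constructor
    · rw [PySem.List.mem_pyRange_one]
      constructor
      · have : (0:Int) ≤ PySem.Str.len (PySem.Str.lower password) := by
          rw [PySem.Str.len_eq]; positivity
        omega
      · omega
    · rw [pvSliceEmpty _ m hD, pvIsInEmpty, pvIsInEmpty]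
      rfl
  rw [hEq] at hmem
  exact absurd hmem (List.not_mem_nil)
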